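-- pv_equiv track=rewrite | github.com/wilmurillo-ai/Design-Assistant | .skills/openclaw-skills/skills/justinbao19/seo-geo-qa/scripts/verify_links.py | same_brand_domain
-- ===== SOURCE A (Python) =====
-- _EXTRA_BRAND_ROOTS: list[str] = []
--
-- def same_brand_domain(a: str, b: str) -> bool:
--     if a == b:
--         return True
--     major_roots = [
--         "apple.com", "google.com", "microsoft.com", "notion.com", "notion.so",
--         "zapier.com", "openai.com", "anthropic.com", "evernote.com",
--     ] + _EXTRA_BRAND_ROOTS
--     for root in major_roots:
--         if (a == root or a.endswith('.' + root)) and (b == root or b.endswith('.' + root)):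
--             return True
--     return False
-- ===== SOURCE B (Python) =====
-- _EXTRA_BRAND_ROOTS: list[str] = []
--
-- _BRAND_ROOTS = frozenset([
--     "apple.com", "google.com", "microsoft.com", "notion.com", "notion.so",
--     "zapier.com", "openai.com", "anthropic.com", "evernote.com",
-- ] + _EXTRA_BRAND_ROOTS)
--
--
-- def _brand_root(x: str) -> str:
--     """The registrable two-label tail of x: its suffix after the second-to-last '.'."""
--     tail = []
--     dots = 0
--     for ch in reversed(x):
--         if ch == '.':
--             dots += 1
--             if dots == 2:
--                 break
--         tail.append(ch)
--     return ''.join(reversed(tail))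
--
--
-- def same_brand_domain(a: str, b: str) -> bool:
--     if a == b:
--         return True
--     ra = _brand_root(a)
--     return ra in _BRAND_ROOTS and ra == _brand_root(b)
-- ===== Notes on version B (the rewrite author's own statement) =====
-- stated objective: alternative
-- what changed: B derives each domain's two-label tail (the suffix after its second-to-last dot) in one right-to-left scan and answers with a single set-membership test plus one comparison, instead of A's loop over all brand roots with a per-root suffix test.
import Mathlib
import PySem

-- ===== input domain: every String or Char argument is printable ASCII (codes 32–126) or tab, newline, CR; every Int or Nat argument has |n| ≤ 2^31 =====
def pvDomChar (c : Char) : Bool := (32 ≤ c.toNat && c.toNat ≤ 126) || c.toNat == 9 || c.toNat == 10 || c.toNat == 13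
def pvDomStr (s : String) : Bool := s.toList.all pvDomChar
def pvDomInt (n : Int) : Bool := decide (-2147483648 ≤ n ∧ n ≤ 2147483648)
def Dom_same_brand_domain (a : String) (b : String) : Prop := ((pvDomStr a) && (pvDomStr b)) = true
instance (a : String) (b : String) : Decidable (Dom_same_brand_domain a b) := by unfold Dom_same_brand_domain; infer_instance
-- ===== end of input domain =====

-- B extracts each domain's two-label tail (its suffix after the second-to-last '.')
-- in one right-to-left scan and does a single set lookup, instead of A's scan over
-- every brand root with a per-root suffix test; a different algorithm, similar cost.

-- ===== PORT A =====
-- the module-level root list (_EXTRA_BRAND_ROOTS is the empty list, so the '+' adds nothing)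
def majorRoots : List String :=
  ["apple.com", "google.com", "microsoft.com", "notion.com", "notion.so",
   "zapier.com", "openai.com", "anthropic.com", "evernote.com"]

-- the 'for root in major_roots' loop with early 'return True'
def sbLoop (a b : String) : List String → Bool
  | [] => false
  | root :: rest =>
      if ((a == root || PySem.Str.endswith a ("." ++ root)) &&
          (b == root || PySem.Str.endswith b ("." ++ root))) then true
      else sbLoop a b rest

def same_brand_domain (a : String) (b : String) : Bool :=
  if a == b then true else sbLoop a b majorRoots

-- ===== PORT B =====
-- the 'for ch in reversed(x)' loop of _brand_root: collects chars (in reversed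
-- order) until the second '.' is seen, where it breaks
def brGo : List Char → Nat → List Char
  | [], _ => []
  | c :: cs, dots =>
      if c = '.' then
        if dots + 1 = 2 then []
        else c :: brGo cs (dots + 1)
      else c :: brGo cs dots

-- _brand_root(x): run the loop over reversed(x); return ''.join(reversed(tail))
def brandRoot (x : String) : String :=
  String.ofList ((brGo x.toList.reverse 0).reverse)

-- _BRAND_ROOTS = frozenset([...] + _EXTRA_BRAND_ROOTS) (the extra list is empty)
def brandRootsSet : PySem.Set String :=
  PySem.Set.ofList
    (["apple.com", "google.com", "microsoft.com", "notion.com", "notion.so",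
      "zapier.com", "openai.com", "anthropic.com", "evernote.com"] ++ [])

def same_brand_domain_alt (a : String) (b : String) : Bool :=
  if a == b then true
  else
    let ra := brandRoot a
    PySem.Set.contains brandRootsSet ra && (ra == brandRoot b)

-- ===== PRECONDITION & SPEC =====
def Spec_same_brand_domain (a : String) (b : String) (out : Bool) : Prop := out = same_brand_domain_alt a b
instance (a : String) (b : String) (out : Bool) : Decidable (Spec_same_brand_domain a b out) := by unfold Spec_same_brand_domain; infer_instance

-- ===== CLAIM =====
def Claim_equal_same_brand_domain : Prop := ∀ (a : String) (b : String), Dom_same_brand_domain a b → Spec_same_brand_domain a b (same_brand_domain a b)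

-- ===== LEMMAS AND PROOFS =====
lemma brGo_nil (d : Nat) : brGo [] d = [] := rfl
lemma brGo_dot_zero (cs : List Char) : brGo ('.' :: cs) 0 = '.' :: brGo cs 1 := rfl
lemma brGo_dot_one (cs : List Char) : brGo ('.' :: cs) 1 = [] := rfl
lemma brGo_ne (c : Char) (cs : List Char) (d : Nat) (h : c ≠ '.') :
    brGo (c :: cs) d = c :: brGo cs d := by
  simp [brGo, h]

lemma ne_cons_eq {c d : Char} (h : ¬ c = d) {l m : List Char} :
    (c :: l = d :: m) ↔ False := by simp [h]
lemma ne_cons_prefix {c d : Char} (h : ¬ c = d) {l m : List Char} :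
    (c :: l <+: d :: m) ↔ False := by simp [List.cons_prefix_cons, h]

-- after one '.' has been seen, the loop collects a dot-free target ur
-- exactly when the rest is ur or starts with ur ++ ['.']
lemma brGo_one_eq_iff (l : List Char) (ur : List Char) (hu : '.' ∉ ur) :
    brGo l 1 = ur ↔ l = ur ∨ (ur ++ ['.']) <+: l := by
  induction l generalizing ur with
  | nil =>
      rw [brGo_nil]
      constructor
      · intro h; exact Or.inl h
      · rintro (h | h)
        · exact h
        · exact absurd (List.prefix_nil.mp h) (by simp)
  | cons c cs ih =>
      by_cases hc : c = '.'
      · subst hc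
        rw [brGo_dot_one]
        cases ur with
        | nil => simp [List.cons_prefix_cons]
        | cons u us =>
            have hu0 : u ≠ '.' := fun h => hu (by simp [h])
            simp [List.cons_append, ne_cons_eq (fun h => hu0 h.symm),
              ne_cons_prefix hu0]
      · rw [brGo_ne c cs 1 hc]
        cases ur with
        | nil =>
            simp only [List.nil_append]
            constructor
            · intro h; simp at h
            · rintro (h | h)
              · simp at h
              · rw [List.cons_prefix_cons] at h
                exact absurd h.1.symm hc
        | cons u us =>
            have hu' : '.' ∉ us := fun h => hu (List.mem_cons_of_mem _ h)
            by_cases hcu : c = u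
            · subst hcu
              simp [List.cons_prefix_cons, ih us hu']
            · simp [List.cons_append, ne_cons_eq hcu,
                ne_cons_prefix (fun h => hcu h.symm)]

-- the scan from dots = 0 produces w = vr ++ '.' :: ur (both halves dot-free)
-- exactly when the list is w or starts with w ++ ['.']
lemma brGo_zero_eq_iff (l vr ur : List Char) (hv : '.' ∉ vr) (hu : '.' ∉ ur) :
    brGo l 0 = vr ++ '.' :: ur ↔ l = vr ++ '.' :: ur ∨ ((vr ++ '.' :: ur) ++ ['.']) <+: l := by
  induction l generalizing vr with
  | nil =>
      rw [brGo_nil]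
      constructor
      · intro h; exact absurd (congrArg List.length h) (by simp)
      · rintro (h | h)
        · exact absurd (congrArg List.length h) (by simp)
        · exact absurd (List.prefix_nil.mp h) (by simp)
  | cons c cs ih =>
      by_cases hc : c = '.'
      · subst hc
        rw [brGo_dot_zero]
        cases vr with
        | nil =>
            simp only [List.nil_append]
            rw [List.cons_append, List.cons_prefix_cons]
            constructor
            · intro h
              have h2 : brGo cs 1 = ur := (List.cons_eq_cons.mp h).2
              rcases (brGo_one_eq_iff cs ur hu).mp h2 with h3 | h3
              · exact Or.inl (by rw [h3])
              · exact Or.inr ⟨rfl, h3⟩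
            · rintro (h | h)
              · have h2 : cs = ur := (List.cons_eq_cons.mp h).2
                rw [List.cons_eq_cons]
                exact ⟨rfl, (brGo_one_eq_iff cs ur hu).mpr (Or.inl h2)⟩
              · rw [List.cons_eq_cons]
                exact ⟨rfl, (brGo_one_eq_iff cs ur hu).mpr (Or.inr h.2)⟩
        | cons v vs =>
            have hv0 : v ≠ '.' := fun h => hv (by simp [h])
            simp [List.cons_append, ne_cons_eq (fun h => hv0 h.symm),
              ne_cons_prefix hv0]
      · rw [brGo_ne c cs 0 hc]
        cases vr with
        | nil =>
            simp [List.cons_append, ne_cons_eq hc,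
              ne_cons_prefix (fun h => hc h.symm)]
        | cons v vs =>
            have hv' : '.' ∉ vs := fun h => hv (List.mem_cons_of_mem _ h)
            by_cases hcv : c = v
            · subst hcv
              simp only [List.cons_append, List.cons_prefix_cons, List.cons_eq_cons,
                true_and]
              simpa [List.append_assoc] using ih vs hv'
            · simp [List.cons_append, ne_cons_eq hcv,
                ne_cons_prefix (fun h => hcv h.symm)]

lemma ofList_beq_iff (l : List Char) (r : String) :
    (String.ofList l == r) = true ↔ l = r.toList := by
  rw [beq_iff_eq]
  constructor
  · intro h; simpa using congrArg String.toList h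
  · intro h; rw [h]; simp

lemma brandRoot_beq_iff (a r : String) :
    ((brandRoot a == r) = true) ↔ brGo a.toList.reverse 0 = r.toList.reverse := by
  unfold brandRoot
  rw [ofList_beq_iff, List.reverse_eq_iff]

-- A's per-root test agrees with B's "the two-label tail equals this root",
-- for any root of the shape u ++ "." ++ v with dot-free halves
lemma matchA_eq_root (a r : String) (vr ur : List Char)
    (hw : r.toList.reverse = vr ++ '.' :: ur) (hv : '.' ∉ vr) (hu : '.' ∉ ur) :
    (a == r || PySem.Str.endswith a ("." ++ r)) = (brandRoot a == r) := by
  rw [Bool.eq_iff_iff, Bool.or_eq_true, brandRoot_beq_iff, hw,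
    brGo_zero_eq_iff _ _ _ hv hu]
  have hrevr : ('.' :: r.toList).reverse = (vr ++ '.' :: ur) ++ ['.'] := by
    rw [List.reverse_cons, hw]
  have hends : (PySem.Str.endswith a ("." ++ r) = true) ↔ ('.' :: r.toList) <:+ a.toList := by
    rw [PySem.Str.endswith_eq, PySem.Chars.endswith_iff]
    simp
  have heq : ((a == r) = true) ↔ a.toList.reverse = vr ++ '.' :: ur := by
    rw [beq_iff_eq, ← hw]
    constructor
    · intro h; rw [h]
    · intro h
      have h2 := congrArg List.reverse h
      simp only [List.reverse_reverse] at h2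
      simpa using congrArg String.ofList h2
  have hsuf : (((vr ++ '.' :: ur) ++ ['.']) <+: a.toList.reverse) ↔ ('.' :: r.toList) <:+ a.toList := by
    constructor
    · intro h
      rw [← hrevr] at h
      exact List.reverse_prefix.mp h
    · intro h
      rw [← List.reverse_prefix, hrevr] at h
      exact h
  rw [heq, hends, hsuf]

-- A's early-return loop answers: "some root matches both a and b"
lemma sbLoop_eq_any (a b : String) (rs : List String) :
    sbLoop a b rs = rs.any (fun r =>
      (a == r || PySem.Str.endswith a ("." ++ r)) &&
      (b == r || PySem.Str.endswith b ("." ++ r))) := by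
  induction rs with
  | nil => rfl
  | cons r rest ih =>
      simp only [sbLoop, List.any_cons, ih]
      cases hc : ((a == r || PySem.Str.endswith a ("." ++ r)) &&
                  (b == r || PySem.Str.endswith b ("." ++ r))) <;> simp

lemma matchA_eq_root_mem (x r : String) (hr : r ∈ majorRoots) :
    (x == r || PySem.Str.endswith x ("." ++ r)) = (brandRoot x == r) := by
  simp only [majorRoots] at hr
  fin_cases hr
  · exact matchA_eq_root x _ "moc".toList "elppa".toList (by decide) (by decide) (by decide)
  · exact matchA_eq_root x _ "moc".toList "elgoog".toList (by decide) (by decide) (by decide)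
  · exact matchA_eq_root x _ "moc".toList "tfosorcim".toList (by decide) (by decide) (by decide)
  · exact matchA_eq_root x _ "moc".toList "noiton".toList (by decide) (by decide) (by decide)
  · exact matchA_eq_root x _ "os".toList "noiton".toList (by decide) (by decide) (by decide)
  · exact matchA_eq_root x _ "moc".toList "reipaz".toList (by decide) (by decide) (by decide)
  · exact matchA_eq_root x _ "moc".toList "ianepo".toList (by decide) (by decide) (by decide)
  · exact matchA_eq_root x _ "moc".toList "ciporhtna".toList (by decide) (by decide) (by decide)
  · exact matchA_eq_root x _ "moc".toList "etonreve".toList (by decide) (by decide) (by decide)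

lemma brandRootsSet_eq : brandRootsSet = majorRoots := by decide

-- ===== VERDICT =====
theorem same_brand_domain_spec : Claim_equal_same_brand_domain := by
  intro a b _
  unfold Spec_same_brand_domain same_brand_domain same_brand_domain_alt
  by_cases hab : a = b
  · simp [hab]
  · rw [if_neg (by simpa using hab), if_neg (by simpa using hab), sbLoop_eq_any]
    show _ = (PySem.Set.contains brandRootsSet (brandRoot a) && (brandRoot a == brandRoot b))
    rw [Bool.eq_iff_iff, Bool.and_eq_true, List.any_eq_true]
    constructor
    · rintro ⟨r, hr, hx⟩
      rw [matchA_eq_root_mem a r hr, matchA_eq_root_mem b r hr] at hx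
      rw [Bool.and_eq_true] at hx
      obtain ⟨h1, h2⟩ := hx
      have e1 := beq_iff_eq.mp h1
      have e2 := beq_iff_eq.mp h2
      refine ⟨?_, beq_iff_eq.mpr (e1.trans e2.symm)⟩
      apply (PySem.Set.contains_iff _ _).mpr
      rw [brandRootsSet_eq]
      exact e1 ▸ hr
    · rintro ⟨h1, h2⟩
      have hmem : brandRoot a ∈ majorRoots := by
        rw [← brandRootsSet_eq]
        exact (PySem.Set.contains_iff _ _).mp h1
      refine ⟨brandRoot a, hmem, ?_⟩
      rw [matchA_eq_root_mem a _ hmem, matchA_eq_root_mem b _ hmem]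
      have e := beq_iff_eq.mp h2
      simp [← e]
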